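-- pv_equiv track=rewrite | github.com/kilivan4iK/warno-blender-plugin | modding_suite_atlas_export.py | _atlas_rel_candidates_for_asset
-- ===== SOURCE A (Python) =====
-- from typing import Any, Dict, List
--
-- def _norm_asset(path: str) -> str:
--     raw = str(path or "").replace("\\", "/").strip()
--     raw = raw.lstrip("/")
--     while "//" in raw:
--         raw = raw.replace("//", "/")
--     return raw
--
-- def _atlas_rel_candidates_for_asset(asset_path: str) -> List[str]:
--     norm = _norm_asset(asset_path)
--     parts = [p for p in norm.split("/") if p]
--     if len(parts) < 2:
--         return []
--     dir_parts = parts[:-1]  # drop .fbx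
--     # Try exact dir first, then parents up to Assets.
--     rels: List[str] = []
--     for i in range(len(dir_parts), 0, -1):
--         cur = "/".join(dir_parts[:i]).strip("/")
--         if not cur:
--             continue
--         if not cur.lower().startswith("assets/"):
--             continue
--         rels.append(f"PC/Atlas/{cur}/TextureSmall.atlas")
--         if cur.lower() == "assets":
--             break
--     # De-dup preserve order.
--     out: List[str] = []
--     seen: set[str] = set()
--     for r in rels:
--         k = r.lower()
--         if k in seen:
--             continue
--         seen.add(k)
--         out.append(r)
--     return out
-- ===== SOURCE B (Python) =====
-- from typing import List
--
-- def _norm_asset(path: str) -> str: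
--     raw = str(path or "").replace("\\", "/").strip()
--     raw = raw.lstrip("/")
--     while "//" in raw:
--         raw = raw.replace("//", "/")
--     return raw
--
-- def _atlas_rel_candidates_for_asset(asset_path: str) -> List[str]:
--     parts = [p for p in _norm_asset(asset_path).split("/") if p]
--     # A candidate prefix must start with "assets/" (case-insensitive), which for
--     # slash-free components means: first component == "assets" and depth >= 2.
--     if len(parts) < 3 or parts[0].lower() != "assets":
--         return []
--     out: List[str] = []
--     cur = parts[0]
--     for p in parts[1:-1]:
--         cur = cur + "/" + p
--         out.append(f"PC/Atlas/{cur}/TextureSmall.atlas")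
--     out.reverse()
--     return out
-- ===== Notes on version B (the rewrite author's own statement) =====
-- stated objective: simpler
-- what changed: Replaces A's scan of every prefix depth with a per-depth join, startswith filter, dead break and no-op de-dup pass by a single upfront guard (first component == 'assets' and depth >= 2) plus one forward pass that extends a running path string and reverses the result.
import Mathlib
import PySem

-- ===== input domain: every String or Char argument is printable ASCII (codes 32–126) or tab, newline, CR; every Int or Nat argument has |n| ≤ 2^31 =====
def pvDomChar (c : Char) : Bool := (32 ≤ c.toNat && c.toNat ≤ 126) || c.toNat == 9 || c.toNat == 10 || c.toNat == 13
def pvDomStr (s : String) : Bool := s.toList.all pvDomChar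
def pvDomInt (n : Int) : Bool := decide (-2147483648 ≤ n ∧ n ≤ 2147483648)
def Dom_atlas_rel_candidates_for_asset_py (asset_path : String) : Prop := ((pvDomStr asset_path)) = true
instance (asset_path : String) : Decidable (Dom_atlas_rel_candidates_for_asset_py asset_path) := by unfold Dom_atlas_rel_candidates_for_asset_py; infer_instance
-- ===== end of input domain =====

-- B replaces A's scan over every prefix depth (join, filter, dead break, no-op de-dup) by one
-- upfront guard plus a single forward pass extending a running path, reversed at the end; objective: simpler.

-- ===== PORT A =====
-- _norm_asset (the module helper both A and B call).  The 'while "//" in raw' loop is ported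
-- with fuel = the current length: each iteration with "//" present strictly shortens the string,
-- so the fuel is never exhausted and the port is exact.
def pvNormCollapse : Nat → List Char → List Char
  | 0, cs => cs
  | fuel+1, cs =>
    if PySem.Chars.isIn ['/', '/'] cs then
      pvNormCollapse fuel (PySem.Chars.replace cs ['/', '/'] ['/'])
    else cs


def pvNormAsset (path : String) : List Char :=
  let raw := PySem.Chars.replace path.toList ['\\'] ['/']
  let raw := PySem.Chars.strip raw
  let raw := raw.dropWhile (· == '/')
  pvNormCollapse raw.length raw


-- the 'for i in range(len(dir_parts), 0, -1)' loop, including the early 'break'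
def pvALoop (dir_parts : List (List Char)) : List Int → List (List Char) → List (List Char)
  | [], rels => rels
  | i :: rest, rels =>
    let cur := PySem.Chars.stripChars (PySem.Chars.join ['/'] (PySem.List.slice dir_parts none (some i))) ['/']
    if cur = [] then pvALoop dir_parts rest rels
    else if !(PySem.Chars.startswith (PySem.Chars.lower cur) "assets/".toList) then pvALoop dir_parts rest rels
    else
      let rels' := rels ++ ["PC/Atlas/".toList ++ cur ++ "/TextureSmall.atlas".toList]
      if PySem.Chars.lower cur = "assets".toList then rels' else pvALoop dir_parts rest rels'


def atlas_rel_candidates_for_asset_py (asset_path : String) : List String :=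
  let norm := pvNormAsset asset_path
  let parts := (PySem.Chars.splitOn norm ['/']).filter (fun p => !p.isEmpty)
  if parts.length < 2 then [] else
  let dir_parts := PySem.List.slice parts none (some (-1))
  let rels := pvALoop dir_parts (PySem.List.pyRange (dir_parts.length : Int) 0 (-1)) []
  ((rels.foldl (fun (st : List (List Char) × PySem.Set (List Char)) r =>
      let k := PySem.Chars.lower r
      if PySem.Set.contains st.2 k then st
      else (st.1 ++ [r], PySem.Set.add st.2 k)) ([], PySem.Set.empty)).1).map String.ofList


-- ===== PORT B =====
-- single forward pass over parts[1:-1], extending the running path 'cur'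
def pvBLoop : List Char → List (List Char) → List (List Char) → List (List Char)
  | _, [], out => out
  | cur, p :: rest, out =>
    let cur' := cur ++ '/' :: p
    pvBLoop cur' rest (out ++ ["PC/Atlas/".toList ++ cur' ++ "/TextureSmall.atlas".toList])


def atlas_rel_candidates_for_asset_py_alt (asset_path : String) : List String :=
  let parts := (PySem.Chars.splitOn (pvNormAsset asset_path) ['/']).filter (fun p => !p.isEmpty)
  if parts.length < 3 ∨ PySem.Chars.lower (parts.headD []) ≠ "assets".toList then []
  else ((pvBLoop (parts.headD []) (PySem.List.slice parts (some 1) (some (-1))) []).reverse).map String.ofList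


-- ===== PRECONDITION & SPEC =====
def Spec_atlas_rel_candidates_for_asset_py (asset_path : String) (out : List String) : Prop := out = atlas_rel_candidates_for_asset_py_alt asset_path
instance (asset_path : String) (out : List String) : Decidable (Spec_atlas_rel_candidates_for_asset_py asset_path out) := by unfold Spec_atlas_rel_candidates_for_asset_py; infer_instance

-- ===== CLAIM (what is proved, stated in full; the proofs are below) =====
def Claim_equal_atlas_rel_candidates_for_asset_py : Prop := ∀ (asset_path : String), Dom_atlas_rel_candidates_for_asset_py asset_path → Spec_atlas_rel_candidates_for_asset_py asset_path (atlas_rel_candidates_for_asset_py asset_path)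

-- ===== LEMMAS AND PROOFS =====

-- proof-side helpers: the candidate string, the "/".join of the first k directory parts,
-- and the list of running joins B's forward pass produces
def pvAtl (cur : List Char) : List Char := "PC/Atlas/".toList ++ cur ++ "/TextureSmall.atlas".toList


def pvJ (d : List (List Char)) (k : Nat) : List Char := PySem.Chars.join ['/'] (d.take k)


def pvScan : List Char → List (List Char) → List (List Char)
  | _, [] => []
  | cur, q :: rest => (cur ++ '/' :: q) :: pvScan (cur ++ '/' :: q) rest


theorem pv_splitOn_go_no_sep (c : Char) :
    ∀ (fuel : Nat) (l cur : List Char) (acc : List (List Char)),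
      l.length < fuel → (∀ x ∈ acc, c ∉ x) → c ∉ cur →
      ∀ p ∈ PySem.Chars.splitOn.go [c] fuel l cur acc, c ∉ p := by
  intro fuel
  induction fuel with
  | zero => intro l cur acc h; exact absurd h (Nat.not_lt_zero _)
  | succ n ih =>
    intro l cur acc hlen hacc hcur p hp
    cases l with
    | nil =>
      rw [PySem.Chars.splitOn.go] at hp
      simp only [List.mem_reverse, List.mem_cons] at hp
      rcases hp with h | h
      · subst h; simpa using hcur
      · exact hacc _ h
      omega
    | cons a rest =>
      rw [PySem.Chars.splitOn.go] at hp
      by_cases hpre : List.isPrefixOf [c] (a :: rest) = true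
      · simp only [hpre, if_true] at hp
        have ha : a = c := by
          simp [List.isPrefixOf] at hpre
          exact hpre.symm
        refine ih _ _ _ (by simp at hlen ⊢; omega) ?_ (by simp) p hp
        intro x hx
        rcases List.mem_cons.mp hx with h | h
        · subst h; simpa using hcur
        · exact hacc _ h
      · simp only [hpre] at hp
        
        have hac : a ≠ c := by
          intro h; subst h
          simp [List.isPrefixOf] at hpre
        refine ih _ _ _ (by simpa using Nat.lt_of_succ_lt_succ hlen) hacc ?_ p hp
        intro h
        rcases List.mem_cons.mp h with h | h
        · exact hac h.symm
        · exact hcur h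


theorem pv_splitOn_no_sep (c : Char) (s : List Char) :
    ∀ p ∈ PySem.Chars.splitOn s [c], c ∉ p := by
  have := pv_splitOn_go_no_sep c (s.length + 1) s [] []
  rw [PySem.Chars.splitOn]
  exact this (by omega) (by simp) (by simp)

theorem pv_lowerChar_slash {c : Char} (h : PySem.Chars.lowerChar c = '/') : c = '/' := by
  unfold PySem.Chars.lowerChar at h
  split_ifs at h with h1
  · exfalso
    simp only [PySem.Chars.isupper, Bool.and_eq_true, decide_eq_true_eq, Char.le_def] at h1
    have hA : ('A' : Char).toNat = 65 := rfl
    have hZ : ('Z' : Char).toNat = 90 := rfl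
    have h65 : 65 ≤ c.toNat := by simpa [Char.le_def] using h1.1
    have h90 : c.toNat ≤ 90 := by simpa [Char.le_def] using h1.2
    have hv : (c.toNat + 32).isValidChar := by left; omega
    have h47 : (Char.ofNat (c.toNat + 32)).toNat = 47 := by rw [h]; rfl
    rw [Char.toNat_ofNat, if_pos hv] at h47
    omega
  · exact h


theorem pv_mem_slash_lower (cs : List Char) : '/' ∈ PySem.Chars.lower cs ↔ '/' ∈ cs := by
  simp only [PySem.Chars.lower, List.mem_map]
  constructor
  · rintro ⟨a, ha, hl⟩
    rwa [pv_lowerChar_slash hl] at ha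
  · intro h; exact ⟨'/', h, rfl⟩


theorem pv_lower_append (a b : List Char) :
    PySem.Chars.lower (a ++ b) = PySem.Chars.lower a ++ PySem.Chars.lower b := by
  simp [PySem.Chars.lower]


theorem pv_lower_cons_slash (b : List Char) :
    PySem.Chars.lower ('/' :: b) = '/' :: PySem.Chars.lower b := by
  simp [PySem.Chars.lower]; rfl


theorem pv_length_lower (cs : List Char) : (PySem.Chars.lower cs).length = cs.length := by
  simp [PySem.Chars.lower]


theorem pv_join_append_singleton (xs : List (List Char)) (y : List Char) (h : xs ≠ []) :
    PySem.Chars.join ['/'] (xs ++ [y]) = PySem.Chars.join ['/'] xs ++ '/' :: y := by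
  induction xs with
  | nil => simp at h
  | cons a t ih =>
    cases t with
    | nil => simp [PySem.Chars.join_singleton, PySem.Chars.join_cons_cons]
    | cons b t' =>
      rw [List.cons_append, List.cons_append, PySem.Chars.join_cons_cons,
        ← List.cons_append, ih (by simp), PySem.Chars.join_cons_cons]
      simp [List.append_assoc]

-- G: prefix–extraction lemma

theorem pv_prefix_append_eq {c : Char} :
    ∀ (a b r : List Char), (a ++ [c]) <+: (b ++ c :: r) → c ∉ a → c ∉ b → a = b := by
  intro a
  induction a with
  | nil =>
    intro b r hp hca hcb
    cases b with
    | nil => rfl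
    | cons b0 b' =>
      exfalso
      rcases hp with ⟨t, ht⟩
      simp at ht
      exact hcb (by simp [ht.1])
  | cons a0 a' ih =>
    intro b r hp hca hcb
    cases b with
    | nil =>
      exfalso
      rcases hp with ⟨t, ht⟩
      simp at ht
      exact hca (by simp [ht.1])
    | cons b0 b' =>
      rcases hp with ⟨t, ht⟩
      simp only [List.cons_append, List.cons.injEq] at ht
      have := ih b' r ⟨t, ht.2⟩ (by intro h; exact hca (List.mem_cons_of_mem _ h))
        (by intro h; exact hcb (List.mem_cons_of_mem _ h))
      rw [ht.1, this]


theorem pv_J_one (p0 : List Char) (d1 : List (List Char)) : pvJ (p0 :: d1) 1 = p0 := by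
  simp [pvJ, PySem.Chars.join_singleton]


theorem pv_J_succ (d : List (List Char)) (k : Nat) (h1 : 1 ≤ k) (h2 : k < d.length) :
    pvJ d (k+1) = pvJ d k ++ '/' :: d[k] := by
  unfold pvJ
  rw [List.take_succ, List.getElem?_eq_getElem h2]
  simp only [Option.toList_some]
  rw [pv_join_append_singleton _ _ (by
    have hl : (List.take k d).length = k := by rw [List.length_take]; omega
    intro hnil
    rw [hnil] at hl
    simp at hl
    omega)]

-- p0 is a prefix of every join

theorem pv_J_head (p0 : List Char) (d1 : List (List Char)) (k : Nat) (h1 : 1 ≤ k) (h2 : k ≤ d1.length + 1) :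
    ∃ t, pvJ (p0 :: d1) k = p0 ++ t := by
  induction k with
  | zero => omega
  | succ n ih =>
    rcases Nat.eq_or_lt_of_le h1 with h | h
    · exact ⟨[], by rw [← h, pv_J_one]; simp⟩
    · have hn1 : 1 ≤ n := by omega
      rcases ih hn1 (by omega) with ⟨t, ht⟩
      refine ⟨t ++ '/' :: (p0 :: d1)[n], ?_⟩
      rw [pv_J_succ _ n hn1 (by simp; omega), ht]
      simp [List.append_assoc]
      rfl


theorem pv_J_last (d : List (List Char)) (k : Nat) (h1 : 1 ≤ k) (h2 : k ≤ d.length) :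
    ∃ t, pvJ d k = t ++ d[k-1]'(by omega) := by
  induction k with
  | zero => omega
  | succ n ih =>
    rcases Nat.eq_or_lt_of_le h1 with h | h
    · cases d with
      | nil => simp at h2
      | cons p0 d1 =>
        refine ⟨[], ?_⟩
        have hn0 : n = 0 := by omega
        subst hn0
        simp [pv_J_one]
    · have hn1 : 1 ≤ n := by omega
      refine ⟨pvJ d n ++ ['/'], ?_⟩
      rw [pv_J_succ _ n hn1 (by omega)]
      simp


theorem pv_J_ne_nil (p0 : List Char) (d1 : List (List Char)) (k : Nat) (h1 : 1 ≤ k)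
    (h2 : k ≤ d1.length + 1) (hp0 : p0 ≠ []) : pvJ (p0 :: d1) k ≠ [] := by
  rcases pv_J_head p0 d1 k h1 h2 with ⟨t, ht⟩
  rw [ht]
  simp [hp0]

-- pvJ for k ≥ 2 splits as p0 ++ '/' :: r

theorem pv_J_slash (p0 : List Char) (d1 : List (List Char)) (k : Nat) (h1 : 2 ≤ k)
    (h2 : k ≤ d1.length + 1) : ∃ r, pvJ (p0 :: d1) k = p0 ++ '/' :: r := by
  induction k with
  | zero => omega
  | succ n ih =>
    rcases Nat.eq_or_lt_of_le h1 with h | h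
    · have hd1 : d1 ≠ [] := by intro h'; subst h'; simp at h2; omega
      refine ⟨(p0 :: d1)[1]'(by simp; omega), ?_⟩
      have := pv_J_succ (p0 :: d1) 1 le_rfl (by simp; omega)
      rw [← h, this, pv_J_one]
    · have hn : 2 ≤ n := by omega
      rcases ih hn (by omega) with ⟨r, hr⟩
      refine ⟨r ++ '/' :: (p0 :: d1)[n]'(by simp; omega), ?_⟩
      rw [pv_J_succ _ n (by omega) (by simp; omega), hr]
      simp

-- strictly increasing lengths

theorem pv_J_len_mono (d : List (List Char)) (k k' : Nat) (h1 : 1 ≤ k) (hk : k < k')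
    (h2 : k' ≤ d.length) : (pvJ d k).length < (pvJ d k').length := by
  induction k' with
  | zero => omega
  | succ n ih =>
    have hstep : (pvJ d n).length < (pvJ d (n+1)).length := by
      rw [pv_J_succ d n (by omega) (by omega)]
      simp
    rcases Nat.eq_or_lt_of_le (Nat.succ_le_of_lt hk) with h | h
    · have : k = n := by omega
      subst this; exact hstep
    · exact lt_trans (ih (by omega) (by omega)) hstep

-- stripChars with "/" is a no-op on a list whose first and last characters are not '/'

theorem pv_stripChars_noop (cs : List Char) (hne : cs ≠ [])
    (hh : cs.head hne ≠ '/') (hl : cs.getLast hne ≠ '/') :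
    PySem.Chars.stripChars cs ['/'] = cs := by
  show (List.dropWhile (fun c => List.contains ['/'] c) (List.dropWhile (fun c => List.contains ['/'] c) cs).reverse).reverse = cs
  have hdw : List.dropWhile (fun c => List.contains ['/'] c) cs = cs := by
    cases cs with
    | nil => rfl
    | cons a t =>
      rw [List.dropWhile_cons]
      have : a ≠ '/' := by simpa using hh
      simp [this]
  rw [hdw]
  have hdw2 : List.dropWhile (fun c => List.contains ['/'] c) cs.reverse = cs.reverse := by
    cases h : cs.reverse with
    | nil => rfl
    | cons a t =>
      rw [List.dropWhile_cons]
      have ha : a = cs.getLast hne := by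
        have h1 : cs.reverse.head? = cs.getLast? := List.head?_reverse (l := cs)
        rw [h] at h1
        rw [List.getLast?_eq_getLast (l := cs) (h := hne)] at h1
        simpa using h1
      have : a ≠ '/' := by rw [ha]; exact hl
      simp [this]
  rw [hdw2, List.reverse_reverse]


theorem pv_strip_J (p0 : List Char) (d1 : List (List Char))
    (H : ∀ p ∈ p0 :: d1, p ≠ [] ∧ '/' ∉ p) (k : Nat) (h1 : 1 ≤ k) (h2 : k ≤ d1.length + 1) :
    PySem.Chars.stripChars (pvJ (p0 :: d1) k) ['/'] = pvJ (p0 :: d1) k := by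
  have hp0 := H p0 (by simp)
  have hne : pvJ (p0 :: d1) k ≠ [] := pv_J_ne_nil p0 d1 k h1 h2 hp0.1
  refine pv_stripChars_noop _ hne ?_ ?_
  · rcases pv_J_head p0 d1 k h1 h2 with ⟨t, ht⟩
    have hrw : (pvJ (p0 :: d1) k).head hne = p0.head hp0.1 := by
      have h' : (p0 ++ t).head (ht ▸ hne) = p0.head hp0.1 := List.head_append_of_ne_nil hp0.1
      simpa [← ht] using h'
    rw [hrw]
    intro hc
    exact hp0.2 (hc ▸ List.head_mem hp0.1)
  · have hid : k - 1 < (p0 :: d1).length := by simp; omega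
    rcases pv_J_last (p0 :: d1) k h1 (by simpa using h2) with ⟨t, ht⟩
    have hq := H ((p0 :: d1)[k-1]'hid) (List.getElem_mem hid)
    have hrw : (pvJ (p0 :: d1) k).getLast hne = ((p0 :: d1)[k-1]'hid).getLast hq.1 := by
      have h' : (t ++ (p0 :: d1)[k-1]'hid).getLast (ht ▸ hne) = ((p0 :: d1)[k-1]'hid).getLast hq.1 :=
        List.getLast_append_of_ne_nil _ hq.1
      simpa [← ht] using h'
    rw [hrw]
    intro hc
    exact hq.2 (hc ▸ List.getLast_mem hq.1)


theorem pv_startswith_J (p0 : List Char) (d1 : List (List Char))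
    (H : ∀ p ∈ p0 :: d1, p ≠ [] ∧ '/' ∉ p) (k : Nat) (h1 : 1 ≤ k) (h2 : k ≤ d1.length + 1) :
    PySem.Chars.startswith (PySem.Chars.lower (pvJ (p0 :: d1) k)) "assets/".toList = true
      ↔ (PySem.Chars.lower p0 = "assets".toList ∧ 2 ≤ k) := by
  have hp0 := H p0 (by simp)
  have hns : '/' ∉ PySem.Chars.lower p0 := fun h => hp0.2 ((pv_mem_slash_lower p0).mp h)
  rw [PySem.Chars.startswith_iff]
  rcases Nat.eq_or_lt_of_le h1 with h | h
  · rw [← h, pv_J_one]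
    constructor
    · intro hp
      exfalso
      exact hns (hp.subset (by decide))
    · intro ⟨_, h2'⟩; omega
  · have hk2 : 2 ≤ k := by omega
    rcases pv_J_slash p0 d1 k hk2 h2 with ⟨r, hr⟩
    rw [hr, pv_lower_append, pv_lower_cons_slash]
    have hsplit : "assets/".toList = "assets".toList ++ '/' :: [] := by decide
    constructor
    · intro hp
      refine ⟨?_, hk2⟩
      have := pv_prefix_append_eq "assets".toList (PySem.Chars.lower p0) (PySem.Chars.lower r)
        (by simpa [hsplit] using hp) (by decide) hns
      exact this.symm
    · intro ⟨he, _⟩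
      rw [he]
      exact ⟨PySem.Chars.lower r, by simp⟩


theorem pv_cur_eq_J (p0 : List Char) (d1 : List (List Char))
    (H : ∀ p ∈ p0 :: d1, p ≠ [] ∧ '/' ∉ p) (i : Int) (h1 : 1 ≤ i) (h2 : i.toNat ≤ d1.length + 1) :
    PySem.Chars.stripChars (PySem.Chars.join ['/'] (PySem.List.slice (p0 :: d1) none (some i))) ['/']
      = pvJ (p0 :: d1) i.toNat := by
  rw [PySem.List.slice_to _ (by omega)]
  exact pv_strip_J p0 d1 H i.toNat (by omega) h2


theorem pv_ALoop_no (p0 : List Char) (d1 : List (List Char))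
    (H : ∀ p ∈ p0 :: d1, p ≠ [] ∧ '/' ∉ p) (hcond : PySem.Chars.lower p0 ≠ "assets".toList) :
    ∀ (is : List Int) (rels : List (List Char)),
      (∀ i ∈ is, 1 ≤ i ∧ i.toNat ≤ d1.length + 1) →
      pvALoop (p0 :: d1) is rels = rels := by
  intro is
  induction is with
  | nil => intro rels _; rfl
  | cons i rest ih =>
    intro rels hb
    have hi := hb i (by simp)
    unfold pvALoop
    simp only [pv_cur_eq_J p0 d1 H i hi.1 hi.2]
    have hsw : PySem.Chars.startswith (PySem.Chars.lower (pvJ (p0 :: d1) i.toNat)) "assets/".toList = false := by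
      rw [Bool.eq_false_iff]
      intro h
      exact hcond ((pv_startswith_J p0 d1 H i.toNat (by omega) hi.2).mp h).1
    rw [hsw]
    simp only [Bool.not_false, if_true]
    split
    · exact ih rels (fun j hj => hb j (by simp [hj]))
    · exact ih rels (fun j hj => hb j (by simp [hj]))


theorem pv_ALoop_yes (p0 : List Char) (d1 : List (List Char))
    (H : ∀ p ∈ p0 :: d1, p ≠ [] ∧ '/' ∉ p) (hcond : PySem.Chars.lower p0 = "assets".toList) :
    ∀ (is : List Int) (rels : List (List Char)),
      (∀ i ∈ is, 1 ≤ i ∧ i.toNat ≤ d1.length + 1) →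
      pvALoop (p0 :: d1) is rels
        = rels ++ (is.filter (fun i => decide (2 ≤ i))).map (fun i => pvAtl (pvJ (p0 :: d1) i.toNat)) := by
  intro is
  induction is with
  | nil => intro rels _; simp [pvALoop]
  | cons i rest ih =>
    intro rels hb
    have hi := hb i (by simp)
    have hp0 := H p0 (by simp)
    unfold pvALoop
    simp only [pv_cur_eq_J p0 d1 H i hi.1 hi.2]
    have hnn : pvJ (p0 :: d1) i.toNat ≠ [] := pv_J_ne_nil p0 d1 i.toNat (by omega) hi.2 hp0.1
    rw [if_neg hnn]
    by_cases h2i : 2 ≤ i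
    · have hsw : PySem.Chars.startswith (PySem.Chars.lower (pvJ (p0 :: d1) i.toNat)) "assets/".toList = true :=
        (pv_startswith_J p0 d1 H i.toNat (by omega) hi.2).mpr ⟨hcond, by omega⟩
      rw [hsw]
      simp only [Bool.not_true, Bool.false_eq_true, if_false]
      have hlen6 : p0.length = 6 := by
        have := congrArg List.length hcond
        rw [pv_length_lower] at this
        simpa using this
      have hbreak : PySem.Chars.lower (pvJ (p0 :: d1) i.toNat) ≠ "assets".toList := by
        rcases pv_J_slash p0 d1 i.toNat (by omega) hi.2 with ⟨r, hr⟩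
        intro hcontra
        have := congrArg List.length hcontra
        rw [pv_length_lower, hr] at this
        simp [hlen6] at this
      rw [if_neg hbreak]
      rw [ih _ (fun j hj => hb j (by simp [hj]))]
      have hfilter : List.filter (fun j => decide (2 ≤ j)) (i :: rest)
          = i :: List.filter (fun j => decide (2 ≤ j)) rest := by
        simp [h2i]
      rw [hfilter]
      simp [pvAtl]
    · have hsw : PySem.Chars.startswith (PySem.Chars.lower (pvJ (p0 :: d1) i.toNat)) "assets/".toList = false := by
        rw [Bool.eq_false_iff]
        intro h
        have := ((pv_startswith_J p0 d1 H i.toNat (by omega) hi.2).mp h).2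
        omega
      rw [hsw]
      simp only [Bool.not_false, if_true]
      rw [ih _ (fun j hj => hb j (by simp [hj]))]
      have hfilter : List.filter (fun j => decide (2 ≤ j)) (i :: rest)
          = List.filter (fun j => decide (2 ≤ j)) rest := by
        simp [h2i]
      rw [hfilter]


theorem pv_BLoop_scan : ∀ (qs : List (List Char)) (cur : List Char) (out : List (List Char)),
    pvBLoop cur qs out = out ++ (pvScan cur qs).map pvAtl := by
  intro qs
  induction qs with
  | nil => intro cur out; simp [pvBLoop, pvScan]
  | cons q rest ih =>
    intro cur out
    unfold pvBLoop pvScan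
    rw [ih]
    simp [pvAtl]


theorem pv_scan_index (d : List (List Char)) :
    ∀ (n k : Nat), d.length - k = n → 1 ≤ k → k ≤ d.length →
    pvScan (pvJ d k) (d.drop k) = (List.range' (k+1) (d.length - k)).map (fun i => pvJ d i) := by
  intro n
  induction n with
  | zero =>
    intro k h0 h1 h2
    rw [List.drop_of_length_le (by omega)]
    simp [pvScan, h0]
  | succ n ih =>
    intro k h0 h1 h2
    have hk : k < d.length := by omega
    rw [List.drop_eq_getElem_cons hk]
    unfold pvScan
    rw [← pv_J_succ d k h1 hk]
    rw [ih (k+1) (by omega) (by omega) (by omega)]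
    have hsp : d.length - k = (d.length - (k+1)) + 1 := by omega
    rw [hsp, List.range'_succ]
    simp


theorem pv_dedup_id (l : List (List Char)) :
    ∀ (out : List (List Char)) (seen : PySem.Set (List Char)),
    (∀ a ∈ l, PySem.Chars.lower a ∉ seen) →
    l.Pairwise (fun a b => PySem.Chars.lower a ≠ PySem.Chars.lower b) →
    (l.foldl (fun (st : List (List Char) × PySem.Set (List Char)) r =>
        if PySem.Set.contains st.2 (PySem.Chars.lower r) then st
        else (st.1 ++ [r], PySem.Set.add st.2 (PySem.Chars.lower r))) (out, seen)).1 = out ++ l := by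
  induction l with
  | nil => intro out seen _ _; simp
  | cons a rest ih =>
    intro out seen h1 h2
    have hna : PySem.Chars.lower a ∉ seen := h1 a (by simp)
    have hconta : PySem.Set.contains seen (PySem.Chars.lower a) = false := by
      simp [PySem.Set.contains]
      exact hna
    simp only [List.foldl_cons, hconta, Bool.false_eq_true, if_false]
    rw [PySem.Set.add]
    rw [hconta]
    simp only [Bool.false_eq_true, if_false]
    rw [ih (out ++ [a]) (seen ++ [PySem.Chars.lower a]) ?h1 (List.Pairwise.sublist (by simp) h2)]
    · simp
    · intro b hb
      simp only [List.mem_append, List.mem_singleton]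
      rintro (h | h)
      · exact h1 b (by simp [hb]) h
      · exact (List.rel_of_pairwise_cons h2 hb) h.symm


theorem pv_pyRange_desc (n : Nat) :
    PySem.List.pyRange (n : Int) 0 (-1) = (List.range' 1 n).reverse.map (fun k : Nat => (k : Int)) := by
  rw [List.reverse_range', List.map_map]
  unfold PySem.List.pyRange
  rcases Nat.eq_zero_or_pos n with h | h
  · subst h; simp
  · rw [if_neg (by norm_num), if_neg (by norm_num), if_pos (by exact_mod_cast h)]
    have hc : (((n : Int) - 0 + -(-1) - 1) / -(-1)).toNat = n := by
      norm_num
    rw [hc]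
    apply List.map_congr_left
    intro x hx
    have hxn : x < n := List.mem_range.mp hx
    simp only [Function.comp_apply]
    have h1 : 1 + n - 1 - x = n - x := by omega
    rw [h1]
    push_cast [Nat.cast_sub (le_of_lt hxn)]
    ring


theorem pv_slice_neg_one {α : Type} (xs : List α) :
    PySem.List.slice xs none (some (-1)) = xs.dropLast := by
  simp only [PySem.List.slice, Int.reduceNeg, Order.lt_one_iff, PySem.List.clampIdx_neg_ofNat,
    tsub_zero, List.drop_zero]
  rw [List.dropLast_eq_take]


theorem pv_slice_mid {α : Type} (xs : List α) (h : 1 ≤ xs.length) :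
    PySem.List.slice xs (some 1) (some (-1)) = xs.dropLast.drop 1 := by
  simp only [PySem.List.slice, PySem.List.clampIdx]
  rw [if_neg (by omega : ¬ (1:Int) < 0)]
  rw [if_pos (by omega : (-1:Int) < 0)]
  rw [if_neg (by omega : ¬ (xs.length : Int) + (-1) < 0)]
  have e1 : ((xs.length : Int) + (-1)).toNat = xs.length - 1 := by omega
  have e2 : min (Int.toNat 1) xs.length = 1 := by
    have : Int.toNat 1 = 1 := rfl
    omega
  rw [e1, e2, List.dropLast_eq_take, List.drop_take]


theorem pv_main (s : String) :
    atlas_rel_candidates_for_asset_py s = atlas_rel_candidates_for_asset_py_alt s := by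
  simp only [atlas_rel_candidates_for_asset_py, atlas_rel_candidates_for_asset_py_alt]
  have H : ∀ p ∈ (PySem.Chars.splitOn (pvNormAsset s) ['/']).filter (fun p => !p.isEmpty),
      p ≠ [] ∧ '/' ∉ p := by
    intro p hp
    refine ⟨by simpa using List.of_mem_filter hp, pv_splitOn_no_sep '/' _ p (List.mem_of_mem_filter hp)⟩
  generalize hP : (PySem.Chars.splitOn (pvNormAsset s) ['/']).filter (fun p => !p.isEmpty) = parts at H ⊢
  clear hP
  rcases parts with _ | ⟨p0, _ | ⟨p1, _ | ⟨p2, rest⟩⟩⟩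
  · simp
  · rw [if_pos (by simp), if_pos (Or.inl (by simp))]
  · -- exactly two components: one directory part, A's loop finds nothing
    rw [if_neg (by simp), if_pos (Or.inl (by simp))]
    rw [pv_slice_neg_one]
    have hd : ([p0, p1] : List (List Char)).dropLast = [p0] := by simp
    rw [hd]
    have H' : ∀ p ∈ ([p0] : List (List Char)), p ≠ [] ∧ '/' ∉ p := by
      intro p hp
      simp at hp
      exact hp ▸ H p0 (by simp)
    have hb : ∀ i ∈ PySem.List.pyRange (([p0] : List (List Char)).length : Int) 0 (-1),
        1 ≤ i ∧ i.toNat ≤ ([] : List (List Char)).length + 1 := by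
      rw [pv_pyRange_desc]
      intro i hi
      simp only [List.mem_map, List.mem_reverse, List.mem_range'_1] at hi
      rcases hi with ⟨k, hk, rfl⟩
      simp at hk ⊢
      omega
    by_cases hcond : PySem.Chars.lower p0 = "assets".toList
    · rw [pv_ALoop_yes p0 [] H' hcond _ _ hb]
      have hfilter : (PySem.List.pyRange (([p0] : List (List Char)).length : Int) 0 (-1)).filter
          (fun i => decide (2 ≤ i)) = [] := by
        rw [pv_pyRange_desc]
        simp
      rw [hfilter]
      simp
    · rw [pv_ALoop_no p0 [] H' hcond _ _ hb]
      simp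
  · -- at least three components
    rw [if_neg (by simp)]
    rw [pv_slice_neg_one, pv_slice_mid _ (by simp)]
    have hdl : (p0 :: p1 :: p2 :: rest).dropLast = p0 :: (p1 :: p2 :: rest).dropLast := by
      simp
    rw [hdl]
    set d1 : List (List Char) := (p1 :: p2 :: rest).dropLast with hd1
    have hd1len : d1.length = rest.length + 1 := by simp [hd1]
    have H' : ∀ p ∈ p0 :: d1, p ≠ [] ∧ '/' ∉ p := by
      intro p hp
      rcases List.mem_cons.mp hp with h | h
      · exact h ▸ H p0 (by simp)
      · have : p ∈ p1 :: p2 :: rest := List.dropLast_sublist _ |>.subset h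
        exact H p (by simp [List.mem_cons] at this ⊢; tauto)
    have hb : ∀ i ∈ PySem.List.pyRange ((p0 :: d1).length : Int) 0 (-1),
        1 ≤ i ∧ i.toNat ≤ d1.length + 1 := by
      rw [pv_pyRange_desc]
      intro i hi
      simp only [List.mem_map, List.mem_reverse, List.mem_range'_1] at hi
      rcases hi with ⟨k, hk, rfl⟩
      simp at hk ⊢
      omega
    by_cases hcond : PySem.Chars.lower p0 = "assets".toList
    · rw [if_neg (by simp [hcond])]
      simp only [List.headD_cons]
      rw [pv_ALoop_yes p0 d1 H' hcond _ _ hb]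
      rw [pv_BLoop_scan]
      -- rewrite the B side via the scan characterisation
      have hscan := pv_scan_index (p0 :: d1) ((p0 :: d1).length - 1) 1 rfl (by omega) (by simp)
      rw [pv_J_one] at hscan
      rw [hscan]
      -- rewrite the A side index list
      have hm : (p0 :: d1).length = d1.length + 1 := by simp
      rw [pv_pyRange_desc]
      rw [List.filter_map, List.filter_reverse]
      have hfc : (List.range' 1 (p0 :: d1).length).filter ((fun i => decide (2 ≤ i)) ∘ (fun k : Nat => (k : Int)))
          = List.range' 2 ((p0 :: d1).length - 1) := by
        have hsp : List.range' 1 (p0 :: d1).length = 1 :: List.range' 2 ((p0 :: d1).length - 1) := by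
          rw [hm, List.range'_succ]
          norm_num
        rw [hsp]
        rw [List.filter_cons]
        simp only [Function.comp_apply]
        rw [if_neg (by simp)]
        apply List.filter_eq_self.mpr
        intro a ha
        have := (List.mem_range'_1.mp ha).1
        simp
        omega
      rw [hfc]
      rw [List.map_map, List.map_reverse]
      -- dedup is the identity here
      have hpair : ((List.range' 2 ((p0 :: d1).length - 1)).map
            ((fun i : Int => pvAtl (pvJ (p0 :: d1) i.toNat)) ∘ (fun k : Nat => (k : Int)))).reverse.Pairwise
          (fun a b => PySem.Chars.lower a ≠ PySem.Chars.lower b) := by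
        rw [List.pairwise_reverse, List.pairwise_map]
        have base := List.pairwise_lt_range' (s := 2) (n := (p0 :: d1).length - 1) 1
        refine base.imp_of_mem ?_
        intro a b ha hb hab
        have hba := (List.mem_range'_1.mp ha)
        have hbb := (List.mem_range'_1.mp hb)
        simp only [Function.comp_apply, Int.toNat_natCast]
        intro hcontra
        have hlen := congrArg List.length hcontra
        rw [pv_length_lower, pv_length_lower] at hlen
        have hJ : (pvJ (p0 :: d1) a).length < (pvJ (p0 :: d1) b).length :=
          pv_J_len_mono (p0 :: d1) a b (by omega) hab (by simp at hbb ⊢; omega)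
        simp [pvAtl] at hlen
        omega
      have hdd := pv_dedup_id _ [] PySem.Set.empty (by intro a _ h; simp [PySem.Set.empty] at h) hpair
      simp only [List.nil_append]
      rw [hdd]
      simp [List.map_reverse, List.map_map, Function.comp, Int.toNat_natCast]
    · rw [if_pos (Or.inr (by simpa using hcond))]
      rw [pv_ALoop_no p0 d1 H' hcond _ _ hb]
      simp

-- ===== VERDICT (by name: the statement is the Claim_ definition above) =====
theorem atlas_rel_candidates_for_asset_py_spec : Claim_equal_atlas_rel_candidates_for_asset_py := by
  intro asset_path _
  unfold Spec_atlas_rel_candidates_for_asset_py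
  exact pv_main asset_path
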